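-- pv_equiv track=rewrite | github.com/MrBrantCode/unitest_baseline | mut_generate/mist_train_cf/cf_102952/solution.py | check_increasing_subsequence
-- ===== SOURCE A (Python) =====
-- def check_increasing_subsequence(nums):
--     n = len(nums)
--     if n < 5:
--         return False
--
--     for i in range(n - 4):
--         if nums[i] < nums[i+1] < nums[i+2] < nums[i+3] < nums[i+4]:
--             return True
--
--     return False
-- ===== SOURCE B (Python) =====
-- def check_increasing_subsequence(nums):
--     if not nums:
--         return False
--     run = 1
--     prev = nums[0]
--     for x in nums[1:]:
--         if prev < x:
--             run += 1
--             if run >= 5: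
--                 return True
--         else:
--             run = 1
--         prev = x
--     return False
-- ===== Notes on version B (the rewrite author's own statement) =====
-- stated objective: alternative
-- what changed: B replaces A's scan of all fixed 5-element windows (4 comparisons per start index) with a single pass that maintains the length of the current strictly-increasing run and returns as soon as it reaches 5.
import Mathlib
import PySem

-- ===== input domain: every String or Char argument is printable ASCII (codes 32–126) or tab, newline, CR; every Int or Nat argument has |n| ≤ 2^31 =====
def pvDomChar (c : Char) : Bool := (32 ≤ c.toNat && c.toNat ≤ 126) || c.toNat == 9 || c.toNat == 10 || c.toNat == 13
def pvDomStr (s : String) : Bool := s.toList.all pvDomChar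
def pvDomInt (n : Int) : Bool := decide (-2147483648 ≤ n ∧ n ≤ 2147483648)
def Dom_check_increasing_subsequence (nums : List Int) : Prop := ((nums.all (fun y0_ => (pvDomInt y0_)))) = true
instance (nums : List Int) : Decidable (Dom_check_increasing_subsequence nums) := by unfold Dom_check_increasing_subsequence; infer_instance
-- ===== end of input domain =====

-- B replaces A's scan over all fixed 5-element windows with a single pass that maintains the current strictly-increasing run length (alternative decomposition; both linear).

-- ===== PORT A =====
-- for i < n-4 all five indices are in range, so pyGetD with default 0 is exact here
def check_increasing_subsequence (nums : List Int) : Bool :=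
  let n := nums.length
  if n < 5 then false
  else
    (PySem.List.pyRange 0 ((n : Int) - 4)).any (fun i =>
      decide (PySem.List.pyGetD nums i 0 < PySem.List.pyGetD nums (i+1) 0) &&
      decide (PySem.List.pyGetD nums (i+1) 0 < PySem.List.pyGetD nums (i+2) 0) &&
      decide (PySem.List.pyGetD nums (i+2) 0 < PySem.List.pyGetD nums (i+3) 0) &&
      decide (PySem.List.pyGetD nums (i+3) 0 < PySem.List.pyGetD nums (i+4) 0))

-- ===== PORT B =====
def pvAltLoop (prev run : Int) : List Int → Bool
  | [] => false
  | x :: xs =>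
      if prev < x then
        if run + 1 ≥ 5 then true else pvAltLoop x (run + 1) xs
      else pvAltLoop x 1 xs

def check_increasing_subsequence_alt (nums : List Int) : Bool :=
  match nums with
  | [] => false
  | x :: xs => pvAltLoop x 1 xs

-- ===== PRECONDITION & SPEC =====
def Spec_check_increasing_subsequence (nums : List Int) (out : Bool) : Prop := out = check_increasing_subsequence_alt nums
instance (nums : List Int) (out : Bool) : Decidable (Spec_check_increasing_subsequence nums out) := by unfold Spec_check_increasing_subsequence; infer_instance

-- ===== CLAIM (what is proved, stated in full; the proofs are below) =====
def Claim_equal_check_increasing_subsequence : Prop := ∀ (nums : List Int), Dom_check_increasing_subsequence nums → Spec_check_increasing_subsequence nums (check_increasing_subsequence nums)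

-- ===== LEMMAS AND PROOFS =====

-- `incFrom prev k xs`: the first k elements of xs strictly increase, starting above prev
def incFrom (prev : Int) : Nat → List Int → Bool
  | 0, _ => true
  | _ + 1, [] => false
  | k + 1, x :: xs => decide (prev < x) && incFrom x k xs

-- common reference form: some 5-window of nums is strictly increasing
def hasWin : List Int → Bool
  | [] => false
  | x :: xs => incFrom x 4 xs || hasWin xs

-- A's window test at Nat index i
def wc (nums : List Int) (i : Nat) : Bool :=
  decide (nums.getD i 0 < nums.getD (i+1) 0) &&
  decide (nums.getD (i+1) 0 < nums.getD (i+2) 0) &&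
  decide (nums.getD (i+2) 0 < nums.getD (i+3) 0) &&
  decide (nums.getD (i+3) 0 < nums.getD (i+4) 0)

lemma incFrom_short (prev : Int) (k : Nat) (xs : List Int) (h : xs.length < k) :
    incFrom prev k xs = false := by
  induction xs generalizing prev k with
  | nil => cases k with | zero => omega | succ k => rfl
  | cons x xs ih =>
      cases k with
      | zero => omega
      | succ k =>
          simp only [incFrom, Bool.and_eq_false_iff]
          right; exact ih x k (by simpa using h)

lemma incFrom_mono (prev : Int) (j k : Nat) (xs : List Int) (hjk : j ≤ k)
    (h : incFrom prev k xs = true) : incFrom prev j xs = true := by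
  induction xs generalizing prev j k with
  | nil =>
      cases k with
      | zero => cases Nat.le_zero.mp hjk; exact h
      | succ k => simp [incFrom] at h
  | cons x xs ih =>
      cases j with
      | zero => rfl
      | succ j =>
          cases k with
          | zero => omega
          | succ k =>
              simp only [incFrom, Bool.and_eq_true] at h ⊢
              exact ⟨h.1, ih x j k (by omega) h.2⟩

lemma wc_zero (x : Int) (xs : List Int) (h : 4 ≤ xs.length) : wc (x :: xs) 0 = incFrom x 4 xs := by
  match xs, h with
  | a :: b :: c :: d :: ys, _ =>
      simp [wc, incFrom, Bool.and_assoc]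

-- A in Nat-index form
lemma A_eq_anyForm (nums : List Int) :
    check_increasing_subsequence nums = (List.range (nums.length - 4)).any (wc nums) := by
  unfold check_increasing_subsequence
  by_cases h : nums.length < 5
  · have : nums.length - 4 = 0 := by omega
    simp [h, this]
  · have hcast : ((nums.length : Int) - 4) = ((nums.length - 4 : Nat) : Int) := by
      push_cast [Nat.cast_sub (by omega : 4 ≤ nums.length)]; ring
    simp only [h, if_false, hcast, PySem.List.pyRange_zero_natCast, List.any_map]
    apply List.any_congr rfl
    intro i
    have e1 : ((i : Int) + 1) = ((i + 1 : Nat) : Int) := by push_cast; ring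
    have e2 : ((i : Int) + 2) = ((i + 2 : Nat) : Int) := by push_cast; ring
    have e3 : ((i : Int) + 3) = ((i + 3 : Nat) : Int) := by push_cast; ring
    have e4 : ((i : Int) + 4) = ((i + 4 : Nat) : Int) := by push_cast; ring
    simp only [Function.comp, wc, e1, e2, e3, e4, PySem.List.pyGetD_natCast]

lemma anyForm_eq_hasWin (nums : List Int) :
    (List.range (nums.length - 4)).any (wc nums) = hasWin nums := by
  induction nums with
  | nil => rfl
  | cons x xs ih =>
      by_cases h : (x :: xs).length < 5
      · have h0 : (x :: xs).length - 4 = 0 := by omega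
        have hx : xs.length - 4 = 0 := by simp at h; omega
        rw [h0]
        simp only [List.range_zero, List.any_nil, hasWin]
        rw [incFrom_short x 4 xs (by simp at h; omega)]
        rw [← ih, hx]
        simp
      · have hlen : 4 ≤ xs.length := by simp at h; omega
        have h1 : (x :: xs).length - 4 = (xs.length - 4) + 1 := by
          simp only [List.length_cons]; omega
        rw [h1, List.range_succ_eq_map]
        simp only [List.any_cons, List.any_map]
        rw [hasWin, ← ih, wc_zero x xs hlen]
        congr 1

-- B's loop in terms of incFrom / hasWin
lemma altLoop_eq (xs : List Int) : ∀ (prev : Int) (r : Nat), 1 ≤ r → r ≤ 4 →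
    pvAltLoop prev (r : Int) xs = (incFrom prev (5 - r) xs || hasWin xs) := by
  induction xs with
  | nil =>
      intro prev r h1 h4
      have : 5 - r = (4 - r) + 1 := by omega
      simp [pvAltLoop, hasWin, this, incFrom]
  | cons x xs ih =>
      intro prev r h1 h4
      by_cases hlt : prev < x
      · by_cases hr : r = 4
        · subst hr
          have : ((4 : Nat) : Int) + 1 ≥ 5 := by norm_num
          simp only [pvAltLoop, if_pos hlt, if_pos this]
          have : 5 - (4 : Nat) = 1 := by norm_num
          rw [this]
          simp [incFrom, hlt]
        · have hcast : (r : Int) + 1 = ((r + 1 : Nat) : Int) := by push_cast; ring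
          have hlt5 : ¬ (((r + 1 : Nat) : Int) ≥ 5) := by push_cast; omega
          simp only [pvAltLoop, if_pos hlt, hcast]
          rw [if_neg hlt5]
          rw [ih x (r + 1) (by omega) (by omega)]
          have h5 : 5 - r = (5 - (r + 1)) + 1 := by omega
          rw [hasWin, h5]
          simp only [incFrom, decide_eq_true hlt, Bool.true_and]
          cases h4' : incFrom x 4 xs with
          | false => simp
          | true =>
              have ha' : incFrom x (4 - r) xs = true := by
                have h45 : (4 - r : Nat) = 5 - (r + 1) := by omega
                rw [h45]
                exact incFrom_mono x (5 - (r+1)) 4 xs (by omega) h4'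
              simp [ha']
      · have hcast : (1 : Int) = ((1 : Nat) : Int) := by norm_num
        simp only [pvAltLoop, if_neg hlt, hcast]
        rw [ih x 1 (by omega) (by omega)]
        rw [hasWin]
        have h5 : 5 - r = (4 - r) + 1 := by omega
        rw [h5]
        simp only [incFrom, decide_eq_false hlt, Bool.false_and, Bool.false_or]

lemma B_eq_hasWin (nums : List Int) : check_increasing_subsequence_alt nums = hasWin nums := by
  cases nums with
  | nil => rfl
  | cons x xs =>
      have := altLoop_eq xs x 1 (by omega) (by omega)
      simp only [check_increasing_subsequence_alt]
      rw [show (1 : Int) = ((1 : Nat) : Int) by norm_num, this]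
      have : 5 - (1 : Nat) = 4 := by norm_num
      rw [this, hasWin]

-- ===== VERDICT (by name: the statement is the Claim_ definition above) =====
theorem check_increasing_subsequence_spec : Claim_equal_check_increasing_subsequence := by
  intro nums _
  unfold Spec_check_increasing_subsequence
  rw [A_eq_anyForm, anyForm_eq_hasWin, B_eq_hasWin]
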